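-- pv_equiv track=rewrite | github.com/Blamb411/SPY-80-Delta-Strategy | Analysis/Alpha Picks Analysis/alpha_picks_options_model.py | find_trading_date
-- ===== SOURCE A (Python) =====
-- def find_trading_date(trading_dates, target, direction="on_or_before"):
--     """Find the nearest trading date to target."""
--     if target in trading_dates:
--         return target
--     for i, d in enumerate(trading_dates):
--         if d > target:
--             if direction == "on_or_before":
--                 return trading_dates[i - 1] if i > 0 else None
--             else:
--                 return d
--     if direction == "on_or_before":
--         return trading_dates[-1] if trading_dates else None
--     return None
-- ===== SOURCE B (Python) =====
-- def find_trading_date(trading_dates, target, direction="on_or_before"):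
--     """Find the nearest trading date to target (binary search; trading_dates sorted ascending)."""
--     lo, hi = 0, len(trading_dates)
--     while lo < hi:
--         mid = (lo + hi) // 2
--         if trading_dates[mid] < target:
--             lo = mid + 1
--         else:
--             hi = mid
--     if lo < len(trading_dates) and trading_dates[lo] == target:
--         return target
--     if direction == "on_or_before":
--         return trading_dates[lo - 1] if lo > 0 else None
--     if lo < len(trading_dates):
--         return trading_dates[lo]
--     return None
-- ===== Notes on version B (the rewrite author's own statement) =====
-- stated objective: faster
-- what changed: Replaces the membership test plus linear scan with a single hand-written bisect_left binary search on the sorted date list; Pre_ requires trading_dates sorted ascending, the function's stated use (unsorted lists, where A's linear scan returns order-dependent accidents, are excluded).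
-- outside the precondition, e.g. on find_trading_date(['b', 'a'], 'a', 'on_or_before'): A returns 'a', B returns None
import Mathlib
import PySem

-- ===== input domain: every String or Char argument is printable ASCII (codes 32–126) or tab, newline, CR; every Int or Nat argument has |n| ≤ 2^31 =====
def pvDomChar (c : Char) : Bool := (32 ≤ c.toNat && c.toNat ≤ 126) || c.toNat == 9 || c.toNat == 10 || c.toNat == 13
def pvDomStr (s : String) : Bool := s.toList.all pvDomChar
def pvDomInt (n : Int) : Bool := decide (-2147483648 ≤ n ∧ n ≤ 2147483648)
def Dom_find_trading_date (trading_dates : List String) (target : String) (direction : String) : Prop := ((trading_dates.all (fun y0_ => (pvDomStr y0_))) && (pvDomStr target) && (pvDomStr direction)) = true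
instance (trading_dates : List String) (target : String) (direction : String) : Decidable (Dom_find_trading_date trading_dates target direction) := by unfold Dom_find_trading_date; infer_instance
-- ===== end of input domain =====

-- B replaces A's membership test + linear scan with one bisect_left binary search;
-- Pre_ requires trading_dates sorted ascending (the function's intended use).

-- ===== PORT A =====
-- the for-loop of A: current index and the remaining suffix of trading_dates
def ftdLoop (full : List String) (target : String) (direction : String) : Nat → List String → Option String
  | _, [] =>
      -- loop fell through
      if direction == "on_or_before" then full.getLast? else none
  | i, d :: rest =>
      if target < d then
        if direction == "on_or_before" then
          if i > 0 then some (full.getD (i - 1) "") else none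
        else some d
      else ftdLoop full target direction (i + 1) rest

def find_trading_date (trading_dates : List String) (target : String) (direction : String) : Option String :=
  if trading_dates.contains target then some target
  else ftdLoop trading_dates target direction 0 trading_dates

-- ===== PORT B =====
-- hand-written bisect_left loop of Source B (indices always in range on the calls made; getD is exact there)
def bisectLoop (xs : List String) (target : String) (lo hi : Nat) : Nat :=
  if _h : lo < hi then
    if xs.getD ((lo + hi) / 2) "" < target then bisectLoop xs target ((lo + hi) / 2 + 1) hi
    else bisectLoop xs target lo ((lo + hi) / 2)
  else lo
termination_by hi - lo
decreasing_by all_goals omega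

def find_trading_date_alt (trading_dates : List String) (target : String) (direction : String) : Option String :=
  let lo := bisectLoop trading_dates target 0 trading_dates.length
  if lo < trading_dates.length && (trading_dates.getD lo "" == target) then some target
  else if direction == "on_or_before" then
    if lo > 0 then some (trading_dates.getD (lo - 1) "") else none
  else if lo < trading_dates.length then some (trading_dates.getD lo "")
  else none

-- ===== PRECONDITION & SPEC =====
-- Bool string comparison (code-point lexicographic, = Lean's String ≤; proved below) so that
-- Pre_ is kernel-decidable; used only by Pre_.
def pvLeChars : List Char → List Char → Bool
  | [], _ => true
  | _ :: _, [] => false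
  | a :: as, b :: bs =>
    if a.toNat < b.toNat then true
    else if b.toNat < a.toNat then false
    else pvLeChars as bs

def pvStrLe (a b : String) : Bool := pvLeChars a.toList b.toList

-- Pre_ excludes unsorted lists, on which A still returns: the function's purpose is lookup in a
-- sorted trading calendar, and A's linear-scan answers on unsorted input are order-dependent accidents.
def Pre_find_trading_date (trading_dates : List String) (target : String) (direction : String) : Prop :=
  List.IsChain (fun a b => pvStrLe a b = true) trading_dates
instance (trading_dates : List String) (target : String) (direction : String) : Decidable (Pre_find_trading_date trading_dates target direction) := by unfold Pre_find_trading_date; infer_instance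

def pvWitness_find_trading_date : List String × String × String :=
  (["a", "c"], "b", "on_or_before")

def Spec_find_trading_date (trading_dates : List String) (target : String) (direction : String) (out : Option String) : Prop := out = find_trading_date_alt trading_dates target direction
instance (trading_dates : List String) (target : String) (direction : String) (out : Option String) : Decidable (Spec_find_trading_date trading_dates target direction out) := by unfold Spec_find_trading_date; infer_instance

-- ===== CLAIM (what is proved, stated in full; the proofs are below) =====
def Claim_equal_find_trading_date : Prop := ∀ (trading_dates : List String) (target : String) (direction : String), Dom_find_trading_date trading_dates target direction → Pre_find_trading_date trading_dates target direction → Spec_find_trading_date trading_dates target direction (find_trading_date trading_dates target direction)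

-- ===== LEMMAS AND PROOFS =====

theorem pv_char_lt {a b : Char} : a < b ↔ a.toNat < b.toNat := by
  rw [Char.lt_def, UInt32.lt_iff_toNat_lt]
  exact Iff.rfl

theorem pv_char_eq {a b : Char} (h : a.toNat = b.toNat) : a = b :=
  Char.ext (UInt32.toNat_inj.mp h)

theorem pvLeChars_iff (as bs : List Char) : pvLeChars as bs = true ↔ as ≤ bs := by
  induction as generalizing bs with
  | nil =>
    simp only [pvLeChars]
    rw [← not_lt]
    exact iff_of_true trivial (show ¬ List.Lex (· < ·) bs [] from List.not_lex_nil)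
  | cons a as ih =>
    cases bs with
    | nil =>
      simp only [pvLeChars]
      rw [← not_lt]
      exact iff_of_false (by simp) (fun h => h (show List.Lex (· < ·) [] (a :: as) from List.Lex.nil))
    | cons b bs =>
      have hlex : ((b :: bs) < (a :: as)) ↔ (b < a ∨ b = a ∧ bs < as) :=
        (show ((b :: bs) < (a :: as)) ↔ List.Lex (· < ·) (b :: bs) (a :: as) from Iff.rfl).trans
          List.cons_lex_cons_iff
      simp only [pvLeChars]
      rw [← not_lt, hlex]
      by_cases h1 : a.toNat < b.toNat
      · rw [if_pos h1]
        refine iff_of_true rfl ?_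
        rintro (hba | ⟨rfl, _⟩)
        · have := pv_char_lt.mp hba; omega
        · omega
      · rw [if_neg h1]
        by_cases h2 : b.toNat < a.toNat
        · rw [if_pos h2]
          exact iff_of_false (by simp) (fun hno => hno (Or.inl (pv_char_lt.mpr h2)))
        · rw [if_neg h2]
          have hba : b = a := pv_char_eq (by omega)
          subst hba
          rw [ih bs, ← not_lt]
          simp [lt_irrefl]

theorem pvStrLe_iff (a b : String) : pvStrLe a b = true ↔ a ≤ b := by
  rw [String.le_iff_toList_le]
  exact pvLeChars_iff _ _

theorem pre_pairwise {xs : List String}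
    (h : List.IsChain (fun a b => pvStrLe a b = true) xs) : List.Pairwise (· ≤ ·) xs :=
  List.isChain_iff_pairwise.mp (h.imp (fun a b hab => (pvStrLe_iff a b).mp hab))

-- sorted list: values are monotone in the index (getD form, larger index in range)
theorem sorted_getD_mono {xs : List String} (hs : List.Pairwise (· ≤ ·) xs)
    {i j : Nat} (hij : i ≤ j) (hj : j < xs.length) :
    xs.getD i "" ≤ xs.getD j "" := by
  rcases Nat.eq_or_lt_of_le hij with rfl | hlt
  · exact le_refl _
  · rw [List.getD_eq_getElem _ _ (Nat.lt_of_le_of_lt hij hj), List.getD_eq_getElem _ _ hj]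
    exact (List.pairwise_iff_getElem.mp hs) i j _ hj hlt

-- bisect_left invariant: the result r splits xs into (< target) below r and (≥ target) from r on
theorem bisectLoop_spec (xs : List String) (t : String) (lo hi : Nat) :
    List.Pairwise (· ≤ ·) xs → lo ≤ hi → hi ≤ xs.length →
    (∀ i, i < lo → xs.getD i "" < t) →
    (∀ i, hi ≤ i → i < xs.length → ¬ xs.getD i "" < t) →
    (bisectLoop xs t lo hi ≤ xs.length ∧
     (∀ i, i < bisectLoop xs t lo hi → xs.getD i "" < t) ∧
     (∀ i, bisectLoop xs t lo hi ≤ i → i < xs.length → ¬ xs.getD i "" < t)) := by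
  fun_induction bisectLoop xs t lo hi with
  | case1 lo hi h hlt ih =>
    intro hs hlh hhi hlo hup
    refine ih hs (by omega) hhi ?_ hup
    intro i hi'
    have hmidlen : (lo + hi) / 2 < xs.length := by omega
    rcases Nat.lt_or_ge i lo with h' | h'
    · exact hlo i h'
    · exact lt_of_le_of_lt (sorted_getD_mono hs (by omega) hmidlen) hlt
  | case2 lo hi h hge ih =>
    intro hs hlh hhi hlo hup
    refine ih hs (by omega) (by omega) hlo ?_
    intro i hi' hilen hcon
    rcases Nat.lt_or_ge i hi with h' | h'
    · exact hge (lt_of_le_of_lt (sorted_getD_mono hs hi' hilen) hcon)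
    · exact hup i h' hilen hcon
  | case3 lo hi h =>
    intro hs hlh hhi hlo hup
    exact ⟨by omega, fun i hi' => hlo i hi', fun i hi' hilen => hup i (by omega) hilen⟩

-- A's loop skips all indices m with ¬ t < xs[m]
theorem ftdLoop_skip (xs : List String) (t d : String) (i j : Nat)
    (hij : i ≤ j) (hj : j ≤ xs.length)
    (hm : ∀ m, i ≤ m → m < j → ¬ t < xs.getD m "") :
    ftdLoop xs t d i (xs.drop i) = ftdLoop xs t d j (xs.drop j) := by
  induction hn : j - i generalizing i with
  | zero =>
    have hij' : i = j := by omega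
    subst hij'
    rfl
  | succ n ih =>
    have hi : i < xs.length := by omega
    rw [List.drop_eq_getElem_cons hi]
    show (if t < xs[i] then _ else ftdLoop xs t d (i + 1) (xs.drop (i + 1))) = _
    rw [if_neg (by
      have := hm i (le_refl i) (by omega)
      rwa [List.getD_eq_getElem _ _ hi] at this)]
    exact ih (i + 1) (by omega) (fun m h1 h2 => hm m (by omega) h2) (by omega)

-- A's loop at an index r with t < xs[r]
theorem ftdLoop_stop (xs : List String) (t d : String) (r : Nat)
    (hr : r < xs.length) (ht : t < xs.getD r "") :
    ftdLoop xs t d r (xs.drop r) =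
      (if d == "on_or_before" then (if r > 0 then some (xs.getD (r - 1) "") else none)
       else some (xs.getD r "")) := by
  rw [List.drop_eq_getElem_cons hr]
  show (if t < xs[r] then
          (if d == "on_or_before" then (if r > 0 then some (xs.getD (r - 1) "") else none)
           else some xs[r]) else _) = _
  rw [if_pos (by rwa [List.getD_eq_getElem _ _ hr] at ht), List.getD_eq_getElem _ _ hr]

theorem getLast?_eq_getD (xs : List String) (h : xs ≠ []) :
    xs.getLast? = some (xs.getD (xs.length - 1) "") := by
  have hlt : xs.length - 1 < xs.length := Nat.sub_lt (List.length_pos_iff.mpr h) one_pos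
  rw [List.getLast?_eq_getElem?, List.getElem?_eq_getElem hlt, List.getD_eq_getElem _ _ hlt]

theorem find_trading_date_eq (xs : List String) (t d : String)
    (hs : List.Pairwise (· ≤ ·) xs) :
    find_trading_date xs t d = find_trading_date_alt xs t d := by
  obtain ⟨hrlen, hbelow, habove⟩ :=
    bisectLoop_spec xs t 0 xs.length hs (Nat.zero_le _) (le_refl _) (by omega) (by omega)
  set r := bisectLoop xs t 0 xs.length with hrdef
  unfold find_trading_date find_trading_date_alt
  rw [← hrdef]
  show (if xs.contains t = true then some t else ftdLoop xs t d 0 xs) =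
    if (decide (r < xs.length) && (xs.getD r "" == t)) = true then some t
    else if (d == "on_or_before") = true then
      (if r > 0 then some (xs.getD (r - 1) "") else none)
    else if r < xs.length then some (xs.getD r "") else none
  by_cases hmem : t ∈ xs
  · -- A returns target immediately; B's bisect lands exactly on an occurrence of target
    rw [if_pos (by simpa using hmem)]
    obtain ⟨j, hj, hxj⟩ := List.mem_iff_getElem.mp hmem
    have hjr : r ≤ j := by
      by_contra hcon
      have := hbelow j (by omega)
      rw [List.getD_eq_getElem _ _ hj, hxj] at this
      exact lt_irrefl t this
    have hrlt : r < xs.length := Nat.lt_of_le_of_lt hjr hj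
    have h1 : xs.getD r "" ≤ t := by
      have := sorted_getD_mono hs hjr hj
      rwa [List.getD_eq_getElem _ _ hj, hxj] at this
    have h2 : ¬ xs.getD r "" < t := habove r (le_refl r) hrlt
    have heq : xs.getD r "" = t := le_antisymm h1 (le_of_not_gt h2)
    rw [if_pos (by rw [heq]; simp [hrlt])]
  · -- target absent: A's scan and B's bisect agree index by index
    rw [if_neg (by simpa using hmem)]
    have hA : ftdLoop xs t d 0 xs = ftdLoop xs t d r (xs.drop r) := by
      have := ftdLoop_skip xs t d 0 r (by omega) hrlen
        (fun m _ hm => asymm (hbelow m hm))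
      simpa using this
    rcases Nat.lt_or_ge r xs.length with hrlt | hrge
    · -- bisect stopped strictly inside the list: xs[r] > target
      have hne : xs.getD r "" ≠ t := by
        rw [List.getD_eq_getElem _ _ hrlt]
        intro hcon
        exact hmem (hcon ▸ List.getElem_mem hrlt)
      have ht : t < xs.getD r "" :=
        lt_of_le_of_ne (le_of_not_gt (habove r (le_refl r) hrlt)) (Ne.symm hne)
      have hne' : ¬ (xs[r]?.getD "" = t) := by
        rw [← List.getD_eq_getElem?_getD]; exact hne
      have hB1 : ¬ ((decide (r < xs.length) && (xs.getD r "" == t)) = true) := by simp [hne']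
      rw [hA, ftdLoop_stop xs t d r hrlt ht, if_neg hB1]
      by_cases hd : (d == "on_or_before") = true
      · simp only [if_pos hd]
      · simp only [if_neg hd, if_pos hrlt]
    · -- bisect ran off the end: every element is < target
      have hreq : r = xs.length := by omega
      rw [hA, hreq, List.drop_length]
      show (if d == "on_or_before" then xs.getLast? else none) = _
      have hB2 : ¬ ((decide (xs.length < xs.length) && (xs.getD xs.length "" == t)) = true) := by simp
      rw [if_neg hB2]
      by_cases hd : (d == "on_or_before") = true
      · simp only [if_pos hd]
        by_cases hx : xs = []
        · subst hx; simp
        · rw [getLast?_eq_getD xs hx, if_pos (List.length_pos_iff.mpr hx)]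
      · simp only [if_neg hd, if_neg (lt_irrefl xs.length)]

-- ===== VERDICT (by name: the statement is the Claim_ definition above) =====
theorem find_trading_date_spec : Claim_equal_find_trading_date := by
  intro xs t d _ hpre
  unfold Spec_find_trading_date
  exact find_trading_date_eq xs t d (pre_pairwise hpre)
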